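-- pv_equiv track=rewrite | github.com/jack13berry/metatris | py-metatris/simulator.py | get_pits
-- ===== SOURCE A (Python) =====
-- def get_pits(v):
--   state = v[0]
--   pits = 0
--   lumped_pits = 0
--   curr_pit = 0
--   rows = []
--   row = 18
--   for i in v[1:]:
--     if i != 0:
--       state = 1
--       curr_pit = 0 #lumped pit ends.
--     if i == 0 and state == 1:   #top detected and found a pit
--       if curr_pit == 0:    #we hadn't seen a pit yet
--         lumped_pits += 1    #so this is a new lumped pit
--       curr_pit = 1
--       pits += 1
--       rows.append(row)
--     row -= 1
--   return rows, lumped_pits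
-- ===== SOURCE B (Python) =====
-- def _runs(xs):
--   """Group xs into maximal runs: list of [value, length]."""
--   runs = []
--   for x in xs:
--     if runs and runs[-1][0] == x:
--       runs[-1][1] += 1
--     else:
--       runs.append([x, 1])
--   return runs
--
-- def get_pits(v):
--   active = v[0] == 1
--   rows = []
--   lumped_pits = 0
--   j = 0
--   for val, n in _runs(v[1:]):
--     if val == 0:
--       if active:
--         lumped_pits += 1
--         rows.extend(range(18 - j, 18 - (j + n), -1))
--     else:
--       active = True
--     j += n
--   return rows, lumped_pits
-- ===== Notes on version B (the rewrite author's own statement) =====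
-- stated objective: alternative
-- what changed: B replaces A's per-element state machine (state/pits/curr_pit flags updated for every cell) by run-level processing: it first groups v[1:] into maximal runs of equal values, then handles each run at once -- a zero run under an active surface contributes exactly one lumped pit and a descending range of row numbers.
-- outside the precondition, e.g. on get_pits([]): A raises IndexError, B raises IndexError
import Mathlib
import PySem

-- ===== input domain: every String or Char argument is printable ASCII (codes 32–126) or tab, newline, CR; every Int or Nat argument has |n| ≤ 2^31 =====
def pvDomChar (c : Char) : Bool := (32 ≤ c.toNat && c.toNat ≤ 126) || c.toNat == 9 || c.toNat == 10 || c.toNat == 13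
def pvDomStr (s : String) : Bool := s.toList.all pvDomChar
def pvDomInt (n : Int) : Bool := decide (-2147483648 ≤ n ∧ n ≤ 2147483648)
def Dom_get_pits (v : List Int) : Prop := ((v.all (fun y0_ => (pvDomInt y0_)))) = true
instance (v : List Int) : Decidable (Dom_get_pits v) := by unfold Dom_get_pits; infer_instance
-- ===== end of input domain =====

-- B processes v[1:] as maximal runs of equal values instead of A's per-element state machine;
-- objective: alternative (same O(n) cost, run-level decomposition). Pre_ excludes only the
-- empty list, on which both Pythons raise IndexError.


-- ===== PORT A =====
-- the body of A's 'for i in v[1:]' loop over (state, pits, lumped_pits, curr_pit, rows, row)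
def aStep (acc : Int × Int × Int × Int × List Int × Int) (i : Int) :
    Int × Int × Int × Int × List Int × Int :=
  match acc with
  | (state, pits, lumped, curr, rows, row) =>
    let state1 := if i ≠ 0 then 1 else state
    let curr1 := if i ≠ 0 then 0 else curr
    if i = 0 ∧ state1 = 1 then
      (state1, pits + 1, (if curr1 = 0 then lumped + 1 else lumped), 1, rows ++ [row], row - 1)
    else
      (state1, pits, lumped, curr1, rows, row - 1)

def get_pits (v : List Int) : List Int × Int :=
  match PySem.List.pyGet? v 0 with
  | none => ([], 0)   -- Python raises IndexError here; excluded by Pre_get_pits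
  | some state0 =>
    let r := (PySem.List.slice v (some 1) none).foldl aStep (state0, 0, 0, 0, ([] : List Int), 18)
    (r.2.2.2.2.1, r.2.2.1)

-- ===== PORT B =====
-- B's _runs helper: grow the last run or start a new one (Source B's loop, as a foldl)
def runStep (runs : List (Int × Int)) (x : Int) : List (Int × Int) :=
  match runs.getLast? with
  | some (y, n) => if y = x then runs.dropLast ++ [(y, n + 1)] else runs ++ [(x, 1)]
  | none => [(x, 1)]

def pvRuns (xs : List Int) : List (Int × Int) := xs.foldl runStep []

-- the body of B's 'for val, n in _runs(v[1:])' loop over (active, rows, lumped_pits, j)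
def bStep (acc : Bool × List Int × Int × Int) (run : Int × Int) : Bool × List Int × Int × Int :=
  match acc, run with
  | (active, rows, lumped, j), (val, n) =>
    if val = 0 then
      if active then
        (active, rows ++ PySem.List.pyRange (18 - j) (18 - (j + n)) (-1), lumped + 1, j + n)
      else (active, rows, lumped, j + n)
    else (true, rows, lumped, j + n)

def get_pits_alt (v : List Int) : List Int × Int :=
  match PySem.List.pyGet? v 0 with
  | none => ([], 0)   -- IndexError in Python; excluded by Pre_get_pits
  | some v0 =>
    let r := (pvRuns (PySem.List.slice v (some 1) none)).foldl bStep (v0 == 1, ([] : List Int), 0, 0)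
    (r.2.1, r.2.2.1)

-- ===== PRECONDITION & SPEC =====
-- Pre_ excludes only the empty list: there A's 'v[0]' raises IndexError (B raises too).
def Pre_get_pits (v : List Int) : Prop := v ≠ []
instance (v : List Int) : Decidable (Pre_get_pits v) := by unfold Pre_get_pits; infer_instance
def pvWitness_get_pits : List Int := [1, 0, 2, 0, 0]

def Spec_get_pits (v : List Int) (out : List Int × Int) : Prop := out = get_pits_alt v
instance (v : List Int) (out : List Int × Int) : Decidable (Spec_get_pits v out) := by unfold Spec_get_pits; infer_instance

-- ===== CLAIM (what is proved, stated in full; the proofs are below) =====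
def Claim_equal_get_pits : Prop := ∀ (v : List Int), Dom_get_pits v → Pre_get_pits v → Spec_get_pits v (get_pits v)

-- ===== LEMMAS AND PROOFS =====

-- common elementwise specification: active = "a filled cell has been seen (or v[0]==1)",
-- curr = "we are inside a counted pit", row = current row number
def pvSpec (active curr : Bool) (row : Int) : List Int → List Int × Int
  | [] => ([], 0)
  | x :: xs =>
    if x = 0 then
      if active then
        let r := pvSpec active true (row - 1) xs
        (row :: r.1, if curr then r.2 else r.2 + 1)
      else pvSpec active curr (row - 1) xs
    else pvSpec true false (row - 1) xs

-- A's loop computes pvSpec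
lemma aLoop (xs : List Int) : ∀ (state pits lumped curr : Int) (rows : List Int) (row : Int),
    ((xs.foldl aStep (state, pits, lumped, curr, rows, row)).2.2.2.2.1,
     (xs.foldl aStep (state, pits, lumped, curr, rows, row)).2.2.1)
    = (rows ++ (pvSpec (state == 1) (curr != 0) row xs).1,
       lumped + (pvSpec (state == 1) (curr != 0) row xs).2) := by
  induction xs with
  | nil => intro state pits lumped curr rows row; simp [pvSpec]
  | cons x xs ih =>
    intro state pits lumped curr rows row
    by_cases hx : x = 0
    · subst hx
      by_cases hs : state = 1
      · subst hs
        by_cases hc : curr = 0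
        · subst hc
          simp [List.foldl_cons, aStep, pvSpec, ih]
          omega
        · simp [List.foldl_cons, aStep, pvSpec, hc, ih]
      · simp [List.foldl_cons, aStep, pvSpec, hs, ih]
    · simp [List.foldl_cons, aStep, pvSpec, hx, ih]

-- run lists: merging characterization of pvRuns
def pvConsMerge (p : Int × Int) (rs : List (Int × Int)) : List (Int × Int) :=
  match rs with
  | (y, m) :: rest => if p.1 = y then (p.1, p.2 + m) :: rest else p :: rs
  | [] => [p]

def pvRunsR : List Int → List (Int × Int)
  | [] => []
  | x :: xs => pvConsMerge (x, 1) (pvRunsR xs)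

lemma consMerge_head (x k : Int) (rs : List (Int × Int)) :
    ∃ m rest, pvConsMerge (x, k) rs = (x, m) :: rest := by
  match rs with
  | [] => exact ⟨k, [], rfl⟩
  | (y, m) :: rest =>
    by_cases h : x = y
    · subst h; exact ⟨k + m, rest, by simp [pvConsMerge]⟩
    · exact ⟨k, (y, m) :: rest, by simp [pvConsMerge, h]⟩

lemma consMerge_merge (x k : Int) (rs : List (Int × Int)) :
    pvConsMerge (x, k) (pvConsMerge (x, 1) rs) = pvConsMerge (x, k + 1) rs := by
  match rs with
  | [] => simp [pvConsMerge]
  | (y, m) :: rest =>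
    by_cases h : x = y
    · subst h; simp [pvConsMerge]; ring
    · simp [pvConsMerge, h]

lemma runs_fold (xs : List Int) : ∀ (pref : List (Int × Int)) (y n : Int),
    xs.foldl runStep (pref ++ [(y, n)]) = pref ++ pvConsMerge (y, n) (pvRunsR xs) := by
  induction xs with
  | nil => intro pref y n; simp [pvConsMerge, pvRunsR]
  | cons x xs ih =>
    intro pref y n
    rw [List.foldl_cons]
    have hstep : runStep (pref ++ [(y, n)]) x =
        if y = x then pref ++ [(y, n + 1)] else (pref ++ [(y, n)]) ++ [(x, 1)] := by
      simp [runStep]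
    by_cases h : y = x
    · subst h
      rw [hstep]; simp only [if_true]
      rw [ih pref y (n + 1), pvRunsR, consMerge_merge]
    · rw [hstep]; simp only [if_neg h]
      rw [ih (pref ++ [(y, n)]) x 1, pvRunsR]
      obtain ⟨m, rest, hm⟩ := consMerge_head x 1 (pvRunsR xs)
      rw [hm]
      have : pvConsMerge (y, n) ((x, m) :: rest) = (y, n) :: (x, m) :: rest := by
        simp [pvConsMerge, h]
      rw [this]; simp

lemma pvRuns_eq (xs : List Int) : pvRuns xs = pvRunsR xs := by
  match xs with
  | [] => rfl
  | x :: xs =>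
    show (x :: xs).foldl runStep [] = _
    rw [List.foldl_cons]
    have h1 : runStep [] x = [(x, 1)] := by simp [runStep]
    rw [h1]
    have := runs_fold xs [] x 1
    simpa [pvRunsR] using this

def pvExpand (rs : List (Int × Int)) : List Int :=
  rs.flatMap (fun r => List.replicate r.2.toNat r.1)

def pvChunked : List (Int × Int) → Prop
  | [] => True
  | (_, n) :: [] => 1 ≤ n
  | (x, n) :: (y, m) :: rest => 1 ≤ n ∧ x ≠ y ∧ pvChunked ((y, m) :: rest)

lemma expand_cons (a b : Int) (rs : List (Int × Int)) :
    pvExpand ((a, b) :: rs) = List.replicate b.toNat a ++ pvExpand rs := by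
  simp [pvExpand]

lemma consMerge_ok (x : Int) (rs : List (Int × Int)) (h : pvChunked rs) :
    pvChunked (pvConsMerge (x, 1) rs) ∧ pvExpand (pvConsMerge (x, 1) rs) = x :: pvExpand rs := by
  match rs with
  | [] =>
    refine ⟨by simp [pvConsMerge, pvChunked], ?_⟩
    simp [pvConsMerge, pvExpand]
  | (y, m) :: rest =>
    by_cases hxy : x = y
    · subst hxy
      have hcm : pvConsMerge (x, 1) ((x, m) :: rest) = (x, 1 + m) :: rest := by
        simp [pvConsMerge]
      have hm : 1 ≤ m := by
        match rest, h with
        | [], h => exact h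
        | (z, k) :: rest', h => exact h.1
      constructor
      · rw [hcm]
        match rest, h with
        | [], h => show 1 ≤ 1 + m; omega
        | (z, k) :: rest', h =>
          exact ⟨by omega, h.2.1, h.2.2⟩
      · rw [hcm, expand_cons, expand_cons]
        have : (1 + m).toNat = m.toNat + 1 := by omega
        rw [this, List.replicate_succ]
        simp
    · have hcm : pvConsMerge (x, 1) ((y, m) :: rest) = (x, 1) :: (y, m) :: rest := by
        simp [pvConsMerge, hxy]
      refine ⟨?_, ?_⟩
      · rw [hcm]; exact ⟨le_refl 1, hxy, h⟩
      · rw [hcm, expand_cons]; simp [pvExpand]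

lemma runsR_ok (xs : List Int) : pvChunked (pvRunsR xs) ∧ pvExpand (pvRunsR xs) = xs := by
  induction xs with
  | nil => exact ⟨trivial, rfl⟩
  | cons x xs ih =>
    have h := consMerge_ok x (pvRunsR xs) ih.1
    exact ⟨h.1, by rw [pvRunsR, h.2, ih.2]⟩

-- behaviour of pvSpec on one maximal run
lemma spec_nonzero_run (x : Int) (hx : x ≠ 0) : ∀ (k : Nat) (a c : Bool) (row : Int) (ys : List Int),
    pvSpec a c row (List.replicate (k + 1) x ++ ys)
    = pvSpec true false (row - ((k + 1 : Nat) : Int)) ys := by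
  intro k
  induction k with
  | zero => intro a c row ys; simp [pvSpec, hx]
  | succ k ih =>
    intro a c row ys
    rw [List.replicate_succ, List.cons_append]
    show pvSpec a c row (x :: _) = _
    rw [show pvSpec a c row (x :: (List.replicate (k + 1) x ++ ys))
        = pvSpec true false (row - 1) (List.replicate (k + 1) x ++ ys) by simp [pvSpec, hx]]
    rw [ih]
    congr 1
    push_cast
    ring

lemma spec_zero_inactive : ∀ (k : Nat) (c : Bool) (row : Int) (ys : List Int),
    pvSpec false c row (List.replicate k 0 ++ ys) = pvSpec false c (row - (k : Int)) ys := by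
  intro k
  induction k with
  | zero => intro c row ys; simp
  | succ k ih =>
    intro c row ys
    rw [List.replicate_succ, List.cons_append]
    rw [show pvSpec false c row ((0 : Int) :: (List.replicate k 0 ++ ys))
        = pvSpec false c (row - 1) (List.replicate k 0 ++ ys) by simp [pvSpec]]
    rw [ih]
    congr 1
    push_cast
    ring

lemma spec_zero_cont : ∀ (k : Nat) (row : Int) (ys : List Int),
    pvSpec true true row (List.replicate k 0 ++ ys)
    = (PySem.List.pyRange row (row - (k : Int)) (-1) ++ (pvSpec true true (row - (k : Int)) ys).1,
       (pvSpec true true (row - (k : Int)) ys).2) := by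
  intro k
  induction k with
  | zero =>
    intro row ys
    rw [PySem.List.pyRange_neg_one_eq_nil (by omega)]
    simp
  | succ k ih =>
    intro row ys
    rw [List.replicate_succ, List.cons_append]
    rw [show pvSpec true true row ((0 : Int) :: (List.replicate k 0 ++ ys))
        = (row :: (pvSpec true true (row - 1) (List.replicate k 0 ++ ys)).1,
           (pvSpec true true (row - 1) (List.replicate k 0 ++ ys)).2) by simp [pvSpec]]
    rw [ih]
    have hr : row - 1 - (k : Int) = row - ((k + 1 : Nat) : Int) := by push_cast; ring
    have hcons : PySem.List.pyRange row (row - ((k + 1 : Nat) : Int)) (-1)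
        = row :: PySem.List.pyRange (row - 1) (row - ((k + 1 : Nat) : Int)) (-1) :=
      PySem.List.pyRange_neg_one_cons (by push_cast; omega)
    rw [hr, hcons]
    simp

lemma spec_zero_active (k : Nat) (row : Int) (ys : List Int) :
    pvSpec true false row (List.replicate (k + 1) 0 ++ ys)
    = (PySem.List.pyRange row (row - ((k + 1 : Nat) : Int)) (-1)
         ++ (pvSpec true true (row - ((k + 1 : Nat) : Int)) ys).1,
       (pvSpec true true (row - ((k + 1 : Nat) : Int)) ys).2 + 1) := by
  rw [List.replicate_succ, List.cons_append]
  rw [show pvSpec true false row ((0 : Int) :: (List.replicate k 0 ++ ys))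
      = (row :: (pvSpec true true (row - 1) (List.replicate k 0 ++ ys)).1,
         (pvSpec true true (row - 1) (List.replicate k 0 ++ ys)).2 + 1) by simp [pvSpec]]
  rw [spec_zero_cont]
  have hr : row - 1 - (k : Int) = row - ((k + 1 : Nat) : Int) := by push_cast; ring
  have hcons : PySem.List.pyRange row (row - ((k + 1 : Nat) : Int)) (-1)
      = row :: PySem.List.pyRange (row - 1) (row - ((k + 1 : Nat) : Int)) (-1) :=
    PySem.List.pyRange_neg_one_cons (by push_cast; omega)
  rw [hr, hcons]
  simp

lemma spec_curr_irrel (a c c' : Bool) (row : Int) (l : List Int)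
    (h : l = [] ∨ ∃ z zs, z ≠ 0 ∧ l = z :: zs) :
    pvSpec a c row l = pvSpec a c' row l := by
  rcases h with h | ⟨z, zs, hz, h⟩
  · subst h; rfl
  · subst h; simp [pvSpec, hz]

-- B's loop over a chunked run list computes pvSpec with curr = false
lemma bLoop (rs : List (Int × Int)) : ∀ (active : Bool) (rows : List Int) (lumped j : Int),
    pvChunked rs →
    ((rs.foldl bStep (active, rows, lumped, j)).2.1,
     (rs.foldl bStep (active, rows, lumped, j)).2.2.1)
    = (rows ++ (pvSpec active false (18 - j) (pvExpand rs)).1,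
       lumped + (pvSpec active false (18 - j) (pvExpand rs)).2) := by
  induction rs with
  | nil => intro active rows lumped j _; simp [pvSpec, pvExpand]
  | cons p rest ih =>
    intro active rows lumped j h
    obtain ⟨x, n⟩ := p
    have hn : 1 ≤ n := by
      match rest, h with
      | [], h => exact h
      | (z, k) :: rest', h => exact h.1
    have hrest : pvChunked rest := by
      match rest, h with
      | [], _ => trivial
      | (z, k) :: rest', h => exact h.2.2
    have hnn : ((n.toNat : Int)) = n := Int.toNat_of_nonneg (by omega)
    have hk1 : n.toNat = (n.toNat - 1) + 1 := by omega
    rw [List.foldl_cons, expand_cons]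
    by_cases hx : x = 0
    · subst hx
      cases active with
      | false =>
        have hb : bStep (false, rows, lumped, j) (0, n) = (false, rows, lumped, j + n) := by
          simp [bStep]
        rw [hb, ih false rows lumped (j + n) hrest, spec_zero_inactive]
        have : 18 - j - (n.toNat : Int) = 18 - (j + n) := by rw [hnn]; ring
        rw [this]
      | true =>
        have hb : bStep (true, rows, lumped, j) (0, n) =
            (true, rows ++ PySem.List.pyRange (18 - j) (18 - (j + n)) (-1), lumped + 1, j + n) := by
          simp [bStep]
        rw [hb, ih true _ (lumped + 1) (j + n) hrest]
        rw [hk1, spec_zero_active]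
        have h18 : 18 - j - ((((n.toNat - 1) + 1 : Nat) : Int)) = 18 - (j + n) := by
          rw [← hk1, hnn]; ring
        rw [h18]
        have hcc : pvSpec true true (18 - (j + n)) (pvExpand rest)
            = pvSpec true false (18 - (j + n)) (pvExpand rest) := by
          apply spec_curr_irrel
          match rest, h with
          | [], _ => left; rfl
          | (z, k) :: rest', h =>
            right
            have hz : z ≠ 0 := fun hz0 => h.2.1 (hz0 ▸ rfl)
            have hk : 1 ≤ k := by
              match rest', h.2.2 with
              | [], hh => exact hh
              | _ :: _, hh => exact hh.1
            refine ⟨z, List.replicate (k.toNat - 1) z ++ pvExpand rest', hz, ?_⟩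
            rw [expand_cons]
            have hkk : k.toNat = (k.toNat - 1) + 1 := by omega
            conv_lhs => rw [hkk, List.replicate_succ]
            simp
        rw [hcc, Prod.ext_iff]
        constructor
        · simp
        · simp; omega
    · have hb : bStep (active, rows, lumped, j) (x, n) = (true, rows, lumped, j + n) := by
        simp [bStep, hx]
      rw [hb, ih true rows lumped (j + n) hrest]
      rw [hk1, spec_nonzero_run x hx]
      have h18 : 18 - j - ((((n.toNat - 1) + 1 : Nat) : Int)) = 18 - (j + n) := by
        rw [← hk1, hnn]; ring
      rw [h18]

-- ===== VERDICT (by name: the statement is the Claim_ definition above) =====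
theorem get_pits_spec : Claim_equal_get_pits := by
  intro v _ hpre
  unfold Spec_get_pits
  match v with
  | [] => exact absurd rfl hpre
  | hd :: tl =>
    have hget : PySem.List.pyGet? (hd :: tl) (0 : Int) = some hd := by
      simp [PySem.List.pyGet?, PySem.List.pyIdx?]
    have hsl : PySem.List.slice (hd :: tl) (some 1) none = tl := by
      rw [PySem.List.slice_from_one]; rfl
    have hA := aLoop tl hd 0 0 0 [] 18
    have hok := runsR_ok tl
    have hB := bLoop (pvRunsR tl) (hd == 1) [] 0 0 hok.1
    rw [hok.2] at hB
    simp only [show ((0 : Int) != 0) = false by decide, List.nil_append,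
      show (18 : Int) - 0 = 18 by norm_num] at hA hB
    obtain ⟨hA1, hA2⟩ := Prod.ext_iff.mp hA
    obtain ⟨hB1, hB2⟩ := Prod.ext_iff.mp hB
    simp only [get_pits, get_pits_alt, hget, hsl, pvRuns_eq]
    rw [Prod.ext_iff]
    refine ⟨?_, ?_⟩
    · simp only at hA1 hB1 ⊢
      rw [hA1, hB1]
    · simp only at hA2 hB2 ⊢
      rw [hA2, hB2]
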